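-- pv_equiv track=rewrite | github.com/shawnoster/soloquest | soloquest/commands/registry.py | fuzzy_match_command
-- ===== SOURCE A (Python) =====
-- def fuzzy_match_command(name: str, known: list[str]) -> str | None:
--     """Find the best matching command name, or None."""
--     name = name.lower()
--     # Exact match first
--     if name in known:
--         return name
--     # Prefix match
--     matches = [k for k in known if k.startswith(name)]
--     if len(matches) == 1:
--         return matches[0]
--     return None
-- ===== SOURCE B (Python) =====
-- def fuzzy_match_command(name: str, known: list[str]) -> str | None:
--     """Find the best matching command name, or None.
--
--     Single pass: exact match returns immediately; otherwise count prefix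
--     matches and remember the latest candidate, returned only if unique."""
--     name = name.lower()
--     count = 0
--     candidate = None
--     for k in known:
--         if k == name:
--             return name
--         if k.startswith(name):
--             count += 1
--             candidate = k
--     return candidate if count == 1 else None
-- ===== Notes on version B (the rewrite author's own statement) =====
-- stated objective: simpler
-- what changed: Replaces the two-phase membership test plus list comprehension with one fused pass that returns on an exact hit and otherwise maintains only a prefix-match counter and a single candidate.
import Mathlib
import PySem

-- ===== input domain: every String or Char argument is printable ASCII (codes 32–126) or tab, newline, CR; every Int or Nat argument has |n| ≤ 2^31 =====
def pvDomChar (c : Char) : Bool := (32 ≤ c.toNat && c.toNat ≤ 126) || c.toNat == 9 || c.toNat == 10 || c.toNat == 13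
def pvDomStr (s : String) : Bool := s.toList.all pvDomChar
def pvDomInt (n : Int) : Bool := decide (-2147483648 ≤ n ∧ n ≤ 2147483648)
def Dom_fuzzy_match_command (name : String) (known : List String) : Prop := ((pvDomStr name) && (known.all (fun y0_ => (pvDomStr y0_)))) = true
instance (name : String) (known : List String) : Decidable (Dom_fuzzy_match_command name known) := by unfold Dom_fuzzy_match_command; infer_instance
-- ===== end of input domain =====

-- B fuses A's membership test and prefix comprehension into one pass keeping only a counter and one candidate (simpler, O(1) extra space).


-- ===== PORT A =====
def fuzzy_match_command (name : String) (known : List String) : Option String :=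
  let name := PySem.Str.lower name
  if name ∈ known then some name
  else
    let ms := known.filter (fun k => PySem.Str.startswith k name)
    if ms.length == 1 then PySem.List.pyGet? ms 0 else none

-- ===== PORT B =====
-- the fused single pass of Source B: early return on exact match, else count prefixes and keep the latest candidate
def fmcLoop (name : String) : List String → Nat → Option String → Option String
  | [], count, candidate => if count == 1 then candidate else none
  | k :: rest, count, candidate =>
    if k == name then some name
    else if PySem.Str.startswith k name then fmcLoop name rest (count + 1) (some k)
    else fmcLoop name rest count candidate

def fuzzy_match_command_alt (name : String) (known : List String) : Option String :=
  fmcLoop (PySem.Str.lower name) known 0 none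

-- ===== PRECONDITION & SPEC =====
def Spec_fuzzy_match_command (name : String) (known : List String) (out : Option String) : Prop := out = fuzzy_match_command_alt name known
instance (name : String) (known : List String) (out : Option String) : Decidable (Spec_fuzzy_match_command name known out) := by unfold Spec_fuzzy_match_command; infer_instance

-- ===== CLAIM (what is proved, stated in full; the proofs are below) =====
def Claim_equal_fuzzy_match_command : Prop := ∀ (name : String) (known : List String), Dom_fuzzy_match_command name known → Spec_fuzzy_match_command name known (fuzzy_match_command name known)

-- ===== LEMMAS AND PROOFS =====

-- if the exact name occurs anywhere, the loop returns it regardless of accumulated state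
theorem fmcLoop_mem (name : String) (l : List String) (hm : name ∈ l) :
    ∀ (count : Nat) (candidate : Option String), fmcLoop name l count candidate = some name := by
  induction l with
  | nil => cases hm
  | cons k rest ih =>
    intro count candidate
    by_cases hk : k = name
    · simp [fmcLoop, hk]
    · have hrest : name ∈ rest := by
        rcases List.mem_cons.mp hm with h | h
        · exact absurd h.symm hk
        · exact h
      by_cases hp : PySem.Str.startswith k name = true <;>
        simp [fmcLoop, hk, ih hrest]

-- if the exact name does not occur, the loop computes A's unique-prefix answer
theorem fmcLoop_not_mem (name : String) (l : List String) (hm : name ∉ l) :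
    ∀ (count : Nat) (candidate : Option String),
      fmcLoop name l count candidate =
        if count + (l.filter (fun k => PySem.Str.startswith k name)).length = 1 then
          (if (l.filter (fun k => PySem.Str.startswith k name)).length = 1 then
            (l.filter (fun k => PySem.Str.startswith k name)).head?
          else candidate)
        else none := by
  induction l with
  | nil => intro count candidate; simp [fmcLoop]
  | cons k rest ih =>
    intro count candidate
    have hk : ¬ (k == name) = true := by
      simp only [beq_iff_eq]
      exact fun h => hm (h ▸ List.mem_cons_self)
    have hrest : name ∉ rest := fun h => hm (List.mem_cons_of_mem _ h)
    simp only [fmcLoop, if_neg hk]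
    by_cases hp : PySem.Str.startswith k name = true
    · have hf : (k :: rest).filter (fun k => PySem.Str.startswith k name)
          = k :: rest.filter (fun k => PySem.Str.startswith k name) :=
        List.filter_cons_of_pos hp
      rw [if_pos hp, ih hrest, hf, List.length_cons]
      by_cases hc : count + 1 + (rest.filter (fun k => PySem.Str.startswith k name)).length = 1
      · have hL : (rest.filter (fun k => PySem.Str.startswith k name)).length = 0 := by omega
        have hnil : rest.filter (fun k => PySem.Str.startswith k name) = [] :=
          List.length_eq_zero_iff.mp hL
        rw [if_pos hc, if_pos (show count + ((rest.filter (fun k => PySem.Str.startswith k name)).length + 1) = 1 by omega),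
            if_neg (by omega), if_pos (by omega), hnil]
        rfl
      · rw [if_neg hc, if_neg (by omega)]
    · have hf : (k :: rest).filter (fun k => PySem.Str.startswith k name)
          = rest.filter (fun k => PySem.Str.startswith k name) :=
        List.filter_cons_of_neg (by simpa using hp)
      rw [if_neg hp, ih hrest, hf]

-- ===== VERDICT (by name: the statement is the Claim_ definition above) =====
theorem fuzzy_match_command_spec : Claim_equal_fuzzy_match_command := by
  intro name known _
  unfold Spec_fuzzy_match_command fuzzy_match_command fuzzy_match_command_alt
  by_cases hm : PySem.Str.lower name ∈ known
  · rw [if_pos hm, fmcLoop_mem _ known hm]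
  · rw [if_neg hm, fmcLoop_not_mem _ known hm 0 none, Nat.zero_add]
    by_cases h1 : (known.filter (fun k => PySem.Str.startswith k (PySem.Str.lower name))).length = 1
    · rw [if_pos (by simpa using h1), if_pos h1, if_pos h1,
          PySem.List.pyGet?_zero, List.head?_eq_getElem?]
    · rw [if_neg (by simpa using h1), if_neg h1]
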